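-- pv_equiv track=rewrite | github.com/McGill-NLP/ud-to-meaning | automatictesting.py | simplify_clf
-- ===== SOURCE A (Python) =====
-- def simplify_clf(clflines):
--     clflinespctsplit = [x.split("%") for x in clflines]
--     textwords = set(x[1] for x in clflinespctsplit if len(x)>1)
--     # Remove lowercase lines that come from the same word as a Name line.
--     if textwords:
--         linestodrop = []
--         for word in textwords:
--             sameword = [x for x in clflinespctsplit if (len(x)>1 and x[1] == word)]
--             if sameword and max((x[0][3:7] == "Name") for x in sameword): # if this came from the same word
--                 for x in sameword:
--                     if len(x[0]) > 3 and x[0][3].islower():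
--                         linestodrop.append(x)
--         clflinespctsplit = [x for x in clflinespctsplit if x not in linestodrop and len(x) > 0]
--     clflinestokens = [(x[0].split(),x[1:]) for x in clflinespctsplit]
--     # Remove the first argument on the line if it's a "sense" disambiguation thing
--     for i in range(len(clflinestokens)):
--         x, y = clflinestokens[i]
--         if len(x) > 2:
--             if len(x[2]) > 2 and x[2][0]=='"' and x[2][1].isalpha() and x[2][2] == '.' and x[2][3:-1].isdigit() and x[2][-1] == '"':
--                 clflinestokens[i] = (x[:2] + x[3:],y)
--     # Change any ArgN or theta-roles to just Arg.
--     for x,_ in clflinestokens: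
--         if len(x) > 1 and ((x[1] in ("Agent","Theme","Topic","Recipient","Experiencer")) or (
--                 x[1].startswith('Arg') and x[1][3:].isdigit())):
--             x[1] = "Arg"
--     # Remove lines that include variable t if t participates in a Time relation as the second argument.
--     timevars = [x[-1] for x,y in clflinestokens if len(x)>1 and x[1]=='Time']
--     for t in timevars:
--         clflinestokens = [(x,y) for x,y in clflinestokens if t not in x[2:]]
--     # TODO Flatten all PRESUPPOSITION relations
--     return(['%'.join([' '.join(line[0])+' '] + line[1]) for line in clflinestokens])
-- ===== SOURCE B (Python) =====
-- def sense_tag(s):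
--     return (len(s) > 2 and s[0] == '"' and s[1].isalpha() and s[2] == '.'
--             and s[3:-1].isdigit() and s[-1] == '"')
--
--
-- def simplify_clf(clflines):
--     parts = [ln.split("%") for ln in clflines]
--     # One pass: record which words have a Name line.
--     name_words = set()
--     for p in parts:
--         if len(p) > 1 and p[0][3:7] == "Name":
--             name_words.add(p[1])
--     # One filter pass: drop lowercase-relation lines whose word also has a Name line.
--     kept = [p for p in parts
--             if not (len(p) > 1 and p[1] in name_words
--                     and len(p[0]) > 3 and p[0][3].islower())]
--     # One pass: tokenize, strip sense disambiguation, normalize theta roles.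
--     lines = []
--     for p in kept:
--         toks = p[0].split()
--         if len(toks) > 2 and sense_tag(toks[2]):
--             toks = toks[:2] + toks[3:]
--         if len(toks) > 1 and (toks[1] in ("Agent", "Theme", "Topic", "Recipient", "Experiencer")
--                               or (toks[1].startswith("Arg") and toks[1][3:].isdigit())):
--             toks = toks[:1] + ["Arg"] + toks[2:]
--         lines.append((toks, p[1:]))
--     # Collect time variables once, then filter in a single pass.
--     timevars = set(toks[-1] for toks, _ in lines if len(toks) > 1 and toks[1] == "Time")
--     return ['%'.join([' '.join(toks) + ' '] + rest)
--             for toks, rest in lines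
--             if not any(v in timevars for v in toks[2:])]
-- ===== Notes on version B (the rewrite author's own statement) =====
-- stated objective: alternative
-- what changed: Replaced the per-word rescans (rebuilding sameword lists and a linestodrop membership list) with a single pre-pass recording Name-words in a set plus one pointwise filter, fused the two rewrite loops into one pass building new token lists instead of mutating, and replaced the repeated per-timevar filtering passes with one set of timevars and a single filter pass.
import Mathlib
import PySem

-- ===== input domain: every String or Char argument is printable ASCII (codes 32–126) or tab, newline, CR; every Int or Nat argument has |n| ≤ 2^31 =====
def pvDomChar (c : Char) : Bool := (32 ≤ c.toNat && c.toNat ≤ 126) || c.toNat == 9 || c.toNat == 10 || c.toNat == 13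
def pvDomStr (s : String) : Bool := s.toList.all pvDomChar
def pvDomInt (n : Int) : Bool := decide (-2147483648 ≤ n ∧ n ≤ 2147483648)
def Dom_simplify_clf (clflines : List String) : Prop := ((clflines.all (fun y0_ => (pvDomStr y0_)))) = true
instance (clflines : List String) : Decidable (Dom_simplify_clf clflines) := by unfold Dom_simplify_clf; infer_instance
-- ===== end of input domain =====

-- B replaces A's per-word rescans and repeated per-timevar filter passes by one Name-word set,
-- one pointwise filter, one fused rewrite pass and one timevar set (alternative single-pass structure).


-- ===== PORT A =====
-- shared string-level predicates (the identical condition expressions occur verbatim in both Pythons)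
def pvSplitPct (s : String) : List String := (PySem.Str.split? s "%").getD []   -- s.split("%"); sep ≠ "" so split? is always some

def pvName (p : List String) : Bool := PySem.Str.slice (p.headD "") (some 3) (some 7) == "Name"   -- p[0][3:7] == "Name"

def pvLower (p : List String) : Bool :=   -- len(p[0]) > 3 and p[0][3].islower()
  decide ((3:Int) < PySem.Str.len (p.headD "")) && ((PySem.Str.pyGet? (p.headD "") 3).elim false PySem.Chars.islower)

def pvSense (s : String) : Bool :=   -- len(s)>2 and s[0]=='"' and s[1].isalpha() and s[2]=='.' and s[3:-1].isdigit() and s[-1]=='"'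
  decide ((2:Int) < PySem.Str.len s) && (PySem.Str.pyGet? s 0 == some '"') &&
  ((PySem.Str.pyGet? s 1).elim false PySem.Chars.isalpha) && (PySem.Str.pyGet? s 2 == some '.') &&
  PySem.Str.strIsdigit (PySem.Str.slice s (some 3) (some (-1))) && (PySem.Str.pyGet? s (-1) == some '"')

def pvArgRole (w : String) : Bool :=   -- w in ("Agent",...) or (w.startswith('Arg') and w[3:].isdigit())
  (["Agent","Theme","Topic","Recipient","Experiencer"].contains w) ||
  (PySem.Str.startswith w "Arg" && PySem.Str.strIsdigit (PySem.Str.slice w (some 3) none))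

def pvTimeLine (xy : List String × List String) : Bool :=   -- len(x)>1 and x[1]=='Time'
  decide (1 < xy.1.length) && (xy.1.getD 1 "" == "Time")

-- A-side helpers
def aSameword (parts : List (List String)) (word : String) : List (List String) :=
  parts.filter (fun x => decide (1 < x.length) && (x.getD 1 "" == word))

def aLinestodrop (parts : List (List String)) (textwords : List String) : List (List String) :=
  textwords.foldl (fun acc word =>
    let sameword := aSameword parts word
    if (!sameword.isEmpty) && sameword.any pvName then acc ++ sameword.filter pvLower else acc) []

def aSense (xy : List String × List String) : List String × List String :=
  if 2 < xy.1.length then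
    if pvSense (xy.1.getD 2 "") then (xy.1.take 2 ++ xy.1.drop 3, xy.2) else xy
  else xy

def aArg (xy : List String × List String) : List String × List String :=
  if decide (1 < xy.1.length) && pvArgRole (xy.1.getD 1 "") then (xy.1.set 1 "Arg", xy.2) else xy

def simplify_clf (clflines : List String) : List String :=
  let clflinespctsplit := clflines.map pvSplitPct
  let textwords : PySem.Set String :=
    PySem.Set.ofList ((clflinespctsplit.filter (fun x => decide (1 < x.length))).map (fun x => x.getD 1 ""))
  let clflinespctsplit :=
    if textwords.isEmpty then clflinespctsplit
    else
      let linestodrop := aLinestodrop clflinespctsplit textwords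
      clflinespctsplit.filter (fun x => !(linestodrop.contains x) && decide (0 < x.length))
  let step1 := clflinespctsplit.map (fun x => (PySem.Str.split₀ (x.headD ""), x.drop 1))
  let step2 := step1.map aSense
  let step3 := step2.map aArg
  let timevars := (step3.filter pvTimeLine).map (fun xy => xy.1.getLastD "")
  let step4 := timevars.foldl (fun lst t => lst.filter (fun xy => !((xy.1.drop 2).contains t))) step3
  step4.map (fun line => PySem.Str.join "%" ([PySem.Str.join " " line.1 ++ " "] ++ line.2))

-- ===== PORT B =====
def bNameWords (parts : List (List String)) : PySem.Set String :=
  parts.foldl (fun s p => if decide (1 < p.length) && pvName p then PySem.Set.add s (p.getD 1 "") else s)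
    (PySem.Set.ofList [])

def bLine (p : List String) : List String × List String :=
  let toks := PySem.Str.split₀ (p.headD "")
  let toks := if decide (2 < toks.length) && pvSense (toks.getD 2 "") then toks.take 2 ++ toks.drop 3 else toks
  let toks := if decide (1 < toks.length) && pvArgRole (toks.getD 1 "") then toks.take 1 ++ ["Arg"] ++ toks.drop 2 else toks
  (toks, p.drop 1)

def simplify_clf_alt (clflines : List String) : List String :=
  let parts := clflines.map pvSplitPct
  let name_words := bNameWords parts
  let kept := parts.filter (fun p => !(decide (1 < p.length) && name_words.contains (p.getD 1 "") && pvLower p))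
  let lines := kept.map bLine
  let timevars := PySem.Set.ofList ((lines.filter pvTimeLine).map (fun xy => xy.1.getLastD ""))
  (lines.filter (fun l => !((l.1.drop 2).any (fun v => timevars.contains v)))).map
    (fun line => PySem.Str.join "%" ([PySem.Str.join " " line.1 ++ " "] ++ line.2))

-- ===== PRECONDITION & SPEC =====
def Spec_simplify_clf (clflines : List String) (out : List String) : Prop := out = simplify_clf_alt clflines
instance (clflines : List String) (out : List String) : Decidable (Spec_simplify_clf clflines out) := by unfold Spec_simplify_clf; infer_instance

-- ===== CLAIM (what is proved, stated in full; the proofs are below) =====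
def Claim_equal_simplify_clf : Prop := ∀ (clflines : List String), Dom_simplify_clf clflines → Spec_simplify_clf clflines (simplify_clf clflines)

-- ===== LEMMAS AND PROOFS =====

-- s.split("%") is never the empty list
lemma splitOn_go_ne_nil (sep : List Char) : ∀ (fuel : Nat) (l cur : List Char) (acc : List (List Char)),
    PySem.Chars.splitOn.go sep fuel l cur acc ≠ [] := by
  intro fuel
  induction fuel with
  | zero => intro l cur acc; rw [PySem.Chars.splitOn.go.eq_def]; simp
  | succ n ih =>
    intro l cur acc
    rw [PySem.Chars.splitOn.go.eq_def]
    match l with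
    | [] => simp
    | c :: rest =>
      dsimp only
      split
      · exact ih _ _ _
      · exact ih _ _ _

lemma pvSplitPct_ne_nil (s : String) : pvSplitPct s ≠ [] := by
  unfold pvSplitPct PySem.Str.split? PySem.Chars.split?
  simp only [String.toList, List.isEmpty_iff]
  rw [if_neg (by decide)]
  simp only [Option.map_some, Option.getD_some, ne_eq, List.map_eq_nil_iff]
  unfold PySem.Chars.splitOn
  exact splitOn_go_ne_nil _ _ _ _ _

-- membership in B's Name-word set
lemma mem_foldl_add (c : List String → Bool) (k : List String → String) :
    ∀ (L : List (List String)) (s0 : PySem.Set String) (y : String),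
      (y ∈ L.foldl (fun s p => if c p then PySem.Set.add s (k p) else s) s0 ↔
        y ∈ s0 ∨ ∃ p ∈ L, c p = true ∧ k p = y) := by
  intro L
  induction L with
  | nil => simp
  | cons h t ih =>
    intro s0 y
    rw [List.foldl_cons]
    by_cases hc : c h
    · rw [if_pos hc, ih, PySem.Set.mem_add]
      constructor
      · rintro (⟨hy | rfl⟩ | ⟨p, hp, hcp, hk⟩)
        · exact Or.inl hy
        · exact Or.inr ⟨h, List.mem_cons_self .., hc, rfl⟩
        · exact Or.inr ⟨p, List.mem_cons_of_mem _ hp, hcp, hk⟩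
      · rintro (hy | ⟨p, hp, hcp, hk⟩)
        · exact Or.inl (Or.inl hy)
        · rcases List.mem_cons.mp hp with rfl | hp
          · exact Or.inl (Or.inr hk.symm)
          · exact Or.inr ⟨p, hp, hcp, hk⟩
    · rw [if_neg hc, ih]
      constructor
      · rintro (hy | ⟨p, hp, hcp, hk⟩)
        · exact Or.inl hy
        · exact Or.inr ⟨p, List.mem_cons_of_mem _ hp, hcp, hk⟩
      · rintro (hy | ⟨p, hp, hcp, hk⟩)
        · exact Or.inl hy
        · rcases List.mem_cons.mp hp with rfl | hp
          · exact absurd hcp hc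
          · exact Or.inr ⟨p, hp, hcp, hk⟩

lemma mem_bNameWords (parts : List (List String)) (w : String) :
    w ∈ bNameWords parts ↔ ∃ p ∈ parts, (decide (1 < p.length) && pvName p) = true ∧ p.getD 1 "" = w := by
  unfold bNameWords
  rw [mem_foldl_add (fun p => decide (1 < p.length) && pvName p) (fun p => p.getD 1 "") parts _ w]
  simp

-- membership in A's linestodrop accumulator
lemma mem_foldl_append (c : String → Bool) (g : String → List (List String)) :
    ∀ (tw : List String) (a0 : List (List String)) (x : List String),
      (x ∈ tw.foldl (fun acc w => if c w then acc ++ g w else acc) a0 ↔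
        x ∈ a0 ∨ ∃ w ∈ tw, c w = true ∧ x ∈ g w) := by
  intro tw
  induction tw with
  | nil => simp
  | cons h t ih =>
    intro a0 x
    rw [List.foldl_cons]
    by_cases hc : c h
    · rw [if_pos hc, ih]
      simp only [List.mem_append]
      constructor
      · rintro ((hx | hx) | ⟨w, hw, hcw, hxg⟩)
        · exact Or.inl hx
        · exact Or.inr ⟨h, List.mem_cons_self .., hc, hx⟩
        · exact Or.inr ⟨w, List.mem_cons_of_mem _ hw, hcw, hxg⟩
      · rintro (hx | ⟨w, hw, hcw, hxg⟩)
        · exact Or.inl (Or.inl hx)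
        · rcases List.mem_cons.mp hw with rfl | hw
          · exact Or.inl (Or.inr hxg)
          · exact Or.inr ⟨w, hw, hcw, hxg⟩
    · rw [if_neg hc, ih]
      constructor
      · rintro (hx | ⟨w, hw, hcw, hxg⟩)
        · exact Or.inl hx
        · exact Or.inr ⟨w, List.mem_cons_of_mem _ hw, hcw, hxg⟩
      · rintro (hx | ⟨w, hw, hcw, hxg⟩)
        · exact Or.inl hx
        · rcases List.mem_cons.mp hw with rfl | hw
          · exact absurd hcw hc
          · exact Or.inr ⟨w, hw, hcw, hxg⟩

lemma mem_aLinestodrop (parts : List (List String)) (tw : List String) (x : List String) :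
    x ∈ aLinestodrop parts tw ↔
      ∃ w ∈ tw, ((!(aSameword parts w).isEmpty) && (aSameword parts w).any pvName) = true ∧
        x ∈ (aSameword parts w).filter pvLower := by
  unfold aLinestodrop
  rw [mem_foldl_append (fun w => (!(aSameword parts w).isEmpty) && (aSameword parts w).any pvName)
    (fun w => (aSameword parts w).filter pvLower) tw [] x]
  simp

-- x is in linestodrop exactly when x's own word has a Name line and x is a lowercase line
lemma drop_char (parts : List (List String)) (x : List String) (hx : x ∈ parts) :
    x ∈ aLinestodrop parts
        (PySem.Set.ofList ((parts.filter (fun x => decide (1 < x.length))).map (fun x => x.getD 1 ""))) ↔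
      (1 < x.length ∧ x.getD 1 "" ∈ bNameWords parts ∧ pvLower x = true) := by
  rw [mem_aLinestodrop]
  constructor
  · rintro ⟨w, _, hcond, hxf⟩
    rw [List.mem_filter] at hxf
    obtain ⟨hxs, hlow⟩ := hxf
    rw [aSameword, List.mem_filter] at hxs
    obtain ⟨-, hx2⟩ := hxs
    simp only [Bool.and_eq_true, decide_eq_true_eq, beq_iff_eq] at hx2
    obtain ⟨hlen, hw1⟩ := hx2
    refine ⟨hlen, ?_, hlow⟩
    rw [Bool.and_eq_true] at hcond
    obtain ⟨-, hany⟩ := hcond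
    rw [List.any_eq_true] at hany
    obtain ⟨y, hy, hyname⟩ := hany
    rw [aSameword, List.mem_filter] at hy
    obtain ⟨hyp, hy2⟩ := hy
    simp only [Bool.and_eq_true, decide_eq_true_eq, beq_iff_eq] at hy2
    rw [mem_bNameWords]
    exact ⟨y, hyp, by simp [hy2.1, hyname], by rw [hy2.2, hw1]⟩
  · rintro ⟨hlen, hnw, hlow⟩
    have hxs : x ∈ aSameword parts (x.getD 1 "") :=
      List.mem_filter.mpr ⟨hx, by simp [hlen]⟩
    refine ⟨x.getD 1 "", ?_, ?_, List.mem_filter.mpr ⟨hxs, hlow⟩⟩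
    · rw [PySem.Set.mem_ofList, List.mem_map]
      exact ⟨x, List.mem_filter.mpr ⟨hx, by simp [hlen]⟩, rfl⟩
    · rw [Bool.and_eq_true]
      refine ⟨by simpa [List.isEmpty_iff] using List.ne_nil_of_mem hxs, ?_⟩
      rw [List.any_eq_true]
      rw [mem_bNameWords] at hnw
      obtain ⟨p, hp, hc, hpk⟩ := hnw
      rw [Bool.and_eq_true, decide_eq_true_eq] at hc
      exact ⟨p, List.mem_filter.mpr ⟨hp, by rw [hpk]; simp [hc.1]⟩, hc.2⟩

-- A's word-grouped drop phase equals B's single filter pass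
lemma drop_eq (parts : List (List String)) (hne : ∀ x ∈ parts, x ≠ []) :
    (if (PySem.Set.ofList ((parts.filter (fun x => decide (1 < x.length))).map (fun x => x.getD 1 "")) : PySem.Set String).isEmpty
     then parts
     else parts.filter (fun x =>
       !((aLinestodrop parts (PySem.Set.ofList ((parts.filter (fun x => decide (1 < x.length))).map (fun x => x.getD 1 "")))).contains x)
       && decide (0 < x.length)))
    = parts.filter (fun p => !(decide (1 < p.length) && (bNameWords parts).contains (p.getD 1 "") && pvLower p)) := by
  by_cases h : (PySem.Set.ofList ((parts.filter (fun x => decide (1 < x.length))).map (fun x => x.getD 1 "")) : PySem.Set String).isEmpty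
  · rw [if_pos h]
    symm
    rw [List.filter_eq_self]
    intro x hx
    have hlen : ¬ 1 < x.length := by
      intro hlen
      have hmem : x.getD 1 "" ∈
          (PySem.Set.ofList ((parts.filter (fun x => decide (1 < x.length))).map (fun x => x.getD 1 "")) : PySem.Set String) := by
        rw [PySem.Set.mem_ofList, List.mem_map]
        exact ⟨x, List.mem_filter.mpr ⟨hx, by simp [hlen]⟩, rfl⟩
      rw [List.isEmpty_iff] at h
      rw [h] at hmem
      exact List.not_mem_nil hmem
    simp [hlen]
  · rw [if_neg h]
    apply List.filter_congr
    intro x hx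
    have h0 : 0 < x.length := List.length_pos_iff.mpr (hne x hx)
    have hc : (aLinestodrop parts
          (PySem.Set.ofList ((parts.filter (fun x => decide (1 < x.length))).map (fun x => x.getD 1 "")))).contains x
        = (decide (1 < x.length) && (bNameWords parts).contains (x.getD 1 "") && pvLower x) := by
      apply Bool.coe_iff_coe.mp
      rw [List.contains_iff_mem, drop_char parts x hx]
      simp only [Bool.and_eq_true, decide_eq_true_eq]
      exact ⟨fun ⟨a, b, c⟩ => ⟨⟨a, List.contains_iff_mem.mpr b⟩, c⟩,
        fun ⟨⟨a, b⟩, c⟩ => ⟨a, List.contains_iff_mem.mp b, c⟩⟩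
    rw [hc]
    simp [h0]

lemma aSense_eq (xy : List String × List String) :
    aSense xy = (if decide (2 < xy.1.length) && pvSense (xy.1.getD 2 "") then xy.1.take 2 ++ xy.1.drop 3 else xy.1, xy.2) := by
  unfold aSense
  by_cases h2 : 2 < xy.1.length
  · rw [if_pos h2,
      show (decide (2 < xy.1.length) && pvSense (xy.1.getD 2 "")) = pvSense (xy.1.getD 2 "") from by simp [h2]]
    split <;> rfl
  · rw [if_neg h2,
      show (decide (2 < xy.1.length) && pvSense (xy.1.getD 2 "")) = false from by simp [h2]]
    simp

lemma aArg_eq (xy : List String × List String) :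
    aArg xy = (if decide (1 < xy.1.length) && pvArgRole (xy.1.getD 1 "") then xy.1.take 1 ++ ["Arg"] ++ xy.1.drop 2 else xy.1, xy.2) := by
  unfold aArg
  by_cases h : decide (1 < xy.1.length) && pvArgRole (xy.1.getD 1 "")
  · rw [if_pos h, if_pos h]
    have hlen : 1 < xy.1.length := by
      rw [Bool.and_eq_true, decide_eq_true_eq] at h
      exact h.1
    rw [List.set_eq_take_cons_drop _ hlen]
    simp
  · rw [if_neg h, if_neg h]

-- A's two rewrite maps equal B's fused per-line transform
lemma line_eq (p : List String) :
    aArg (aSense (PySem.Str.split₀ (p.headD ""), p.drop 1)) = bLine p := by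
  rw [aSense_eq, aArg_eq]
  rfl

-- A's repeated per-timevar filtering equals B's single filter against the timevar set
lemma time_eq (ts : List String) (L : List (List String × List String)) :
    ts.foldl (fun lst t => lst.filter (fun xy => !((xy.1.drop 2).contains t))) L
      = L.filter (fun l => !((l.1.drop 2).any (fun v => (PySem.Set.ofList ts).contains v))) := by
  have base : ∀ (ts : List String) (L : List (List String × List String)),
      ts.foldl (fun lst t => lst.filter (fun xy => !((xy.1.drop 2).contains t))) L
        = L.filter (fun l => !((l.1.drop 2).any (fun v => ts.contains v))) := by
    intro ts
    induction ts with
    | nil =>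
      intro L
      rw [List.foldl_nil,
        show (fun (l : List String × List String) => !((l.1.drop 2).any (fun v => ([] : List String).contains v)))
            = fun _ => true from by funext l; simp,
        List.filter_true]
    | cons t ts ih =>
      intro L
      rw [List.foldl_cons, ih, List.filter_filter]
      apply List.filter_congr
      intro x _
      apply Bool.coe_iff_coe.mp
      simp only [Bool.and_eq_true, Bool.not_eq_true', List.any_eq_false, List.contains_eq_mem,
        decide_eq_false_iff_not, decide_eq_true_eq, List.mem_cons]
      constructor
      · rintro ⟨h1, h2⟩ v hv hcon
        rcases hcon with rfl | hin
        · exact h2 hv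
        · exact h1 v hv hin
      · intro hall
        exact ⟨fun v hv hin => hall v hv (Or.inr hin), fun hcon => hall t hcon (Or.inl rfl)⟩
  rw [base ts L]
  apply List.filter_congr
  intro x _
  apply Bool.coe_iff_coe.mp
  simp only [Bool.not_eq_true', List.any_eq_false, List.contains_eq_mem, decide_eq_true_eq]
  constructor
  · intro h v hv hc
    exact absurd ((PySem.Set.mem_ofList ts v).mp (List.contains_iff_mem.mp hc)) (h v hv)
  · intro h v hv hd
    exact h v hv (List.contains_iff_mem.mpr ((PySem.Set.mem_ofList ts v).mpr hd))

-- ===== VERDICT (by name: the statement is the Claim_ definition above) =====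
theorem simplify_clf_spec : Claim_equal_simplify_clf := by
  intro clflines _
  unfold Spec_simplify_clf simplify_clf simplify_clf_alt
  dsimp only
  have hne : ∀ x ∈ clflines.map pvSplitPct, x ≠ [] := by
    intro x hx
    rcases List.mem_map.mp hx with ⟨s, _, rfl⟩
    exact pvSplitPct_ne_nil s
  rw [drop_eq _ hne, List.map_map, List.map_map,
    show ((aArg ∘ aSense) ∘ fun x => (PySem.Str.split₀ (x.headD ""), x.drop 1)) = bLine from funext line_eq,
    time_eq]
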